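-- pv_equiv track=rewrite | github.com/bellkisai/kernel | benchmarks/competitor_comparison.py | shrimpk_format_context
-- ===== SOURCE A (Python) =====
-- def shrimpk_format_context(echo_results):
--     parts = []
--     for i, r in enumerate(echo_results, 1):
--         content = r.get("content", "")
--         part = f"=== Memory {i} ===\n{content}"
--         if len(part) > 2000:
--             part = part[:2000]
--         parts.append(part)
--     total = 0
--     kept = []
--     for p in parts:
--         if total + len(p) > 16000:
--             break
--         kept.append(p)
--         total += len(p)
--     return "\n\n".join(kept) if kept else "No relevant memories found."
-- ===== SOURCE B (Python) =====
-- def shrimpk_format_context(echo_results):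
--     def take(i, total, rest):
--         if not rest:
--             return []
--         part = ("=== Memory %d ===\n%s" % (i, rest[0].get("content", "")))[:2000]
--         if total + len(part) > 16000:
--             return []
--         return [part] + take(i + 1, total + len(part), rest[1:])
--     kept = take(1, 0, echo_results)
--     return "\n\n".join(kept) if kept else "No relevant memories found."
-- ===== Notes on version B (the rewrite author's own statement) =====
-- stated objective: alternative
-- what changed: Replaced A's two sequential loops (build-all-parts list, then budget-filter with break) by a single recursive pass that formats, truncates and budget-checks each entry in one step, building the kept list front-to-back and never materialising the intermediate parts list.
import Mathlib
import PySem

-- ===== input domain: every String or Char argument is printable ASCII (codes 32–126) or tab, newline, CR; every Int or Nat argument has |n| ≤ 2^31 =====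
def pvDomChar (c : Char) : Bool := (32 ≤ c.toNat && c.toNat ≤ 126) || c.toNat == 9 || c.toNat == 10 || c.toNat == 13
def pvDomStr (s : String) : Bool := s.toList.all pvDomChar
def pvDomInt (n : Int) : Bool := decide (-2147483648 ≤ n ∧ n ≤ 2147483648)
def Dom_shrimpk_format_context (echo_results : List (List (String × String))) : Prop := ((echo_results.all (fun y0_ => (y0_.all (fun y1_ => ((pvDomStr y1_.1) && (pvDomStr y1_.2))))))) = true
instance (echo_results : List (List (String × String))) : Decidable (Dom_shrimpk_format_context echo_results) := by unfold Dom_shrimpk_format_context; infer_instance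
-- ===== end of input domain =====

-- B single-pass recursion replaces A's two sequential loops; same return value proved for all inputs.

-- ===== PORT A =====
-- second loop of A: 'for p in parts: if total+len(p)>16000: break; kept.append(p); total+=len(p)'
def shrimpkKeep (total : Int) (kept : List (List Char)) : List (List Char) → List (List Char)
  | [] => kept
  | p :: ps =>
    if total + PySem.List.len p > 16000 then kept
    else shrimpkKeep (total + PySem.List.len p) (kept ++ [p]) ps

def shrimpk_format_context (echo_results : List (List (String × String))) : String :=
  let parts := (PySem.List.enumerate echo_results 1).foldl (fun parts ir =>
    let content := PySem.Dict.getD (PySem.Dict.mk ir.2) "content" ""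
    let part := "=== Memory ".toList ++ PySem.Int.toChars ir.1 ++ " ===\n".toList ++ content.toList
    let part := if PySem.List.len part > 2000 then PySem.List.slice part none (some 2000) else part
    parts ++ [part]) []
  let kept := shrimpkKeep 0 [] parts
  if kept ≠ [] then String.ofList (PySem.Chars.join "\n\n".toList kept)
  else "No relevant memories found."

-- ===== PORT B =====
-- Source B's recursive helper 'take(i, total, rest)'
def shrimpkTake (i total : Int) : List (List (String × String)) → List (List Char)
  | [] => []
  | r :: rest =>
    let part := PySem.List.slice ("=== Memory ".toList ++ PySem.Int.toChars i ++ " ===\n".toList ++ (PySem.Dict.getD (PySem.Dict.mk r) "content" "").toList) none (some 2000)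
    if total + PySem.List.len part > 16000 then []
    else part :: shrimpkTake (i + 1) (total + PySem.List.len part) rest

def shrimpk_format_context_alt (echo_results : List (List (String × String))) : String :=
  let kept := shrimpkTake 1 0 echo_results
  if kept ≠ [] then String.ofList (PySem.Chars.join "\n\n".toList kept)
  else "No relevant memories found."

-- ===== PRECONDITION & SPEC =====
def Spec_shrimpk_format_context (echo_results : List (List (String × String))) (out : String) : Prop := out = shrimpk_format_context_alt echo_results
instance (echo_results : List (List (String × String))) (out : String) : Decidable (Spec_shrimpk_format_context echo_results out) := by unfold Spec_shrimpk_format_context; infer_instance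

-- ===== CLAIM (what is proved, stated in full; the proofs are below) =====
def Claim_equal_shrimpk_format_context : Prop := ∀ (echo_results : List (List (String × String))), Dom_shrimpk_format_context echo_results → Spec_shrimpk_format_context echo_results (shrimpk_format_context echo_results)

-- ===== LEMMAS AND PROOFS =====

-- the (truncated) part for entry r at index i, as both programs compute it
def shrimpkPart (i : Int) (r : List (String × String)) : List Char :=
  PySem.List.slice ("=== Memory ".toList ++ PySem.Int.toChars i ++ " ===\n".toList ++ (PySem.Dict.getD (PySem.Dict.mk r) "content" "").toList) none (some 2000)

-- A's conditional truncation equals B's unconditional slice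
theorem shrimpkPart_eq (i : Int) (r : List (String × String)) :
    (let part := "=== Memory ".toList ++ PySem.Int.toChars i ++ " ===\n".toList ++ (PySem.Dict.getD (PySem.Dict.mk r) "content" "").toList
     if PySem.List.len part > 2000 then PySem.List.slice part none (some 2000) else part)
    = shrimpkPart i r := by
  show (if _ then _ else _) = _
  set P := "=== Memory ".toList ++ PySem.Int.toChars i ++ " ===\n".toList ++ (PySem.Dict.getD (PySem.Dict.mk r) "content" "").toList with hP
  have hs : PySem.List.slice P none (some 2000) = P.take 2000 := by
    rw [PySem.List.slice_to P (by norm_num)]; rfl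
  simp only [shrimpkPart, ← hP, hs, PySem.List.len_eq]
  split_ifs with h
  · rfl
  · exact (List.take_of_length_le (by omega)).symm

theorem shrimpkKeep_append (total : Int) (kept : List (List Char)) (ps : List (List Char)) :
    shrimpkKeep total kept ps = kept ++ shrimpkKeep total [] ps := by
  induction ps generalizing total kept with
  | nil => simp [shrimpkKeep]
  | cons p ps ih =>
    simp only [shrimpkKeep]
    split_ifs with h
    · simp
    · rw [ih (kept := kept ++ [p]), ih (kept := [] ++ [p])]; simp

theorem shrimpkTake_eq_keep (rs : List (List (String × String))) (i total : Int) :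
    shrimpkTake i total rs = shrimpkKeep total [] ((PySem.List.enumerate rs i).map (fun ir => shrimpkPart ir.1 ir.2)) := by
  induction rs generalizing i total with
  | nil => simp [shrimpkTake, PySem.List.enumerate_nil, shrimpkKeep]
  | cons r rs ih =>
    simp only [shrimpkTake, PySem.List.enumerate_cons, List.map_cons, shrimpkKeep, shrimpkPart] at ih ⊢
    split_ifs with h
    · rfl
    · rw [shrimpkKeep_append, ih]; rfl

-- ===== VERDICT (by name: the statement is the Claim_ definition above) =====
theorem shrimpk_format_context_spec : Claim_equal_shrimpk_format_context := by
  intro er _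
  show shrimpk_format_context er = shrimpk_format_context_alt er
  unfold shrimpk_format_context shrimpk_format_context_alt
  rw [shrimpkTake_eq_keep]
  have hfold : ((PySem.List.enumerate er 1).foldl (fun parts ir =>
      let content := PySem.Dict.getD (PySem.Dict.mk ir.2) "content" ""
      let part := "=== Memory ".toList ++ PySem.Int.toChars ir.1 ++ " ===\n".toList ++ content.toList
      let part := if PySem.List.len part > 2000 then PySem.List.slice part none (some 2000) else part
      parts ++ [part]) [])
      = (PySem.List.enumerate er 1).map (fun ir => shrimpkPart ir.1 ir.2) := by
    rw [show ((PySem.List.enumerate er 1).foldl (fun parts ir =>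
        let content := PySem.Dict.getD (PySem.Dict.mk ir.2) "content" ""
        let part := "=== Memory ".toList ++ PySem.Int.toChars ir.1 ++ " ===\n".toList ++ content.toList
        let part := if PySem.List.len part > 2000 then PySem.List.slice part none (some 2000) else part
        parts ++ [part]) [])
        = ((PySem.List.enumerate er 1).foldl (fun parts ir => parts ++ [shrimpkPart ir.1 ir.2]) []) from
      PySem.List.foldl_congr_mem _ _ _ [] (fun acc ir _ => by rw [← shrimpkPart_eq])]
    rw [PySem.List.foldl_append_singleton_eq_map]
    simp
  rw [hfold]
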